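-- pv_equiv track=rewrite | github.com/RunjeethNikam/Leetcode | maximum-enemy-forts-that-can-be-captured.py | captureForts
-- ===== SOURCE A (Python) =====
-- from typing import List
--
-- def captureForts(forts: List[int]) -> int:
--     lt = None
--     zeros = 0
--     captured1 = 0
--     for position in forts:
--         if position == 0:
--             zeros += 1
--         else:
--             if lt is None:
--                 lt = position
--             elif lt != position:
--                 captured1 = max(captured1, zeros)
--                 lt = position
--             zeros = 0
--     return captured1
-- ===== SOURCE B (Python) =====
-- from typing import List
--
-- def captureForts(forts: List[int]) -> int:
--     marks = [(i, v) for i, v in enumerate(forts) if v != 0]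
--     best = 0
--     for (i, u), (j, v) in zip(marks, marks[1:]):
--         if u != v:
--             best = max(best, j - i - 1)
--     return best
-- ===== Notes on version B (the rewrite author's own statement) =====
-- stated objective: alternative
-- what changed: B replaces A's stateful single pass (last non-zero value + running zero counter + resets) by first extracting the (index, value) pairs of all non-zero entries and then taking the maximum index gap minus one over consecutive unequal-valued pairs.
import Mathlib
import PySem

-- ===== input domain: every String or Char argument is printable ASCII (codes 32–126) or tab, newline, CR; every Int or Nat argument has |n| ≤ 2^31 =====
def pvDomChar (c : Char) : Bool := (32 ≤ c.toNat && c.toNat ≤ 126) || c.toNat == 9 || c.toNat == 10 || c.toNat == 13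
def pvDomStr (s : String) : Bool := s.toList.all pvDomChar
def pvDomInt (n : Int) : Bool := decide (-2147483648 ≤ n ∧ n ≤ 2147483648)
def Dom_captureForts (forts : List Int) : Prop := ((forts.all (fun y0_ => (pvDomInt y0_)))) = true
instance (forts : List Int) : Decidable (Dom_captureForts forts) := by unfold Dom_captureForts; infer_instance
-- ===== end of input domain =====

-- B re-implements A by a different decomposition: extract the (index, value) pairs of the
-- non-zero entries, then maximise the index gap minus one over consecutive unequal pairs.

-- ===== PORT A =====
-- literal port of A's for-loop: state (lt, zeros, captured1), branches in source order
def captureLoopA : Option Int → Int → Int → List Int → Int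
  | _, _, captured1, [] => captured1
  | lt, zeros, captured1, position :: rest =>
    if position = 0 then
      captureLoopA lt (zeros + 1) captured1 rest
    else
      match lt with
      | none => captureLoopA (some position) 0 captured1 rest
      | some l =>
        if l ≠ position then
          captureLoopA (some position) 0 (max captured1 zeros) rest
        else
          captureLoopA lt 0 captured1 rest

def captureForts (forts : List Int) : Int :=
  captureLoopA none 0 0 forts

-- ===== PORT B =====
def captureForts_alt (forts : List Int) : Int :=
  let marks := (PySem.List.enumerate forts).filter (fun p => p.2 ≠ 0)
  (marks.zip marks.tail).foldl
    (fun best pq => if pq.1.2 ≠ pq.2.2 then max best (pq.2.1 - pq.1.1 - 1) else best) 0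

-- ===== PRECONDITION & SPEC =====
def Spec_captureForts (forts : List Int) (out : Int) : Prop := out = captureForts_alt forts
instance (forts : List Int) (out : Int) : Decidable (Spec_captureForts forts out) := by unfold Spec_captureForts; infer_instance

-- ===== CLAIM (what is proved, stated in full; the proofs are below) =====
def Claim_equal_captureForts : Prop := ∀ (forts : List Int), Dom_captureForts forts → Spec_captureForts forts (captureForts forts)

-- ===== LEMMAS AND PROOFS =====

-- recursion view of B's fold over consecutive pairs
def scanB : (Int × Int) → List (Int × Int) → Int → Int
  | _, [], best => best
  | p, q :: rest, best =>
    scanB q rest (if p.2 ≠ q.2 then max best (q.1 - p.1 - 1) else best)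

theorem foldl_zip_eq_scanB (m : Int × Int) (rest : List (Int × Int)) (best : Int) :
    ((m :: rest).zip rest).foldl
      (fun best pq => if pq.1.2 ≠ pq.2.2 then max best (pq.2.1 - pq.1.1 - 1) else best) best
    = scanB m rest best := by
  induction rest generalizing m best with
  | nil => rfl
  | cons q rest ih => exact ih q _

-- main invariant, lt = some u: u was seen at index k, current index n, zeros = n - k - 1
theorem loopA_some (l : List Int) :
    ∀ (n k u cap : Int), u ≠ 0 →
    captureLoopA (some u) (n - k - 1) cap l
      = scanB (k, u) ((PySem.List.enumerate l n).filter (fun p => p.2 ≠ 0)) cap := by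
  induction l with
  | nil => intro _ _ _ _ _; rfl
  | cons p rest ih =>
    intro n k u cap hu
    rw [PySem.List.enumerate_cons]
    by_cases hp : p = 0
    · subst hp
      simp only [captureLoopA, List.filter_cons, decide_eq_true_eq]
      have : n - k - 1 + 1 = (n + 1) - k - 1 := by ring
      rw [this, ih _ _ _ _ hu]
      simp
    · simp only [captureLoopA, if_neg hp, List.filter_cons]
      by_cases huv : u = p
      · subst huv
        simp only [ne_eq, not_true_eq_false, if_false]
        have h0 : (0 : Int) = (n + 1) - n - 1 := by ring
        rw [h0, ih _ _ _ _ hu]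
        simp [scanB, hp]
      · simp only [ne_eq, huv, not_false_eq_true, if_true]
        have h0 : (0 : Int) = (n + 1) - n - 1 := by ring
        rw [h0, ih _ _ _ _ hp]
        simp [scanB, hp, huv]

-- lt = none phase: zeros before the first non-zero are never captured
theorem loopA_none (l : List Int) (n : Int) (zeros cap : Int) :
    captureLoopA none zeros cap l
      = (match (PySem.List.enumerate l n).filter (fun p => p.2 ≠ 0) with
         | [] => cap
         | m :: rest => scanB m rest cap) := by
  induction l generalizing n zeros with
  | nil => rfl
  | cons p rest ih =>
    rw [PySem.List.enumerate_cons]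
    by_cases hp : p = 0
    · subst hp
      simp only [captureLoopA, List.filter_cons, decide_eq_true_eq]
      rw [ih (n + 1)]
      simp
    · simp only [captureLoopA, if_neg hp, List.filter_cons]
      have h0 : (0 : Int) = (n + 1) - n - 1 := by ring
      rw [h0, loopA_some _ _ _ _ _ hp]
      simp [hp]

-- ===== VERDICT (by name: the statement is the Claim_ definition above) =====
theorem captureForts_spec : Claim_equal_captureForts := by
  intro forts _
  unfold Spec_captureForts captureForts captureForts_alt
  rw [loopA_none forts 0]
  cases h : (PySem.List.enumerate forts 0).filter (fun p => p.2 ≠ 0) with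
  | nil => rfl
  | cons m rest => exact (foldl_zip_eq_scanB m rest 0).symm
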